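-- pv_equiv track=rewrite | github.com/ikmalrasli/extract-exam-questions | server/modules/crop_img.py | sort_boxes_by_position
-- ===== SOURCE A (Python) =====
-- def sort_boxes_by_position(boxes, y_threshold=50):
--     """
--     Sort boxes by position, grouping them into rows based on y-coordinate proximity.
--     Args:
--         boxes: List of ((y1, x1), (x1, y1, x2, y2), type) tuples
--         y_threshold: Maximum y-difference to consider boxes in the same row
--     """
--     # First, group boxes into rows
--     rows = []
--     current_row = []
--     sorted_by_y = sorted(boxes, key=lambda x: x[0][0])  # Sort by y1
--
--     for box in sorted_by_y:
--         if not current_row or abs(box[0][0] - current_row[0][0][0]) <= y_threshold: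
--             current_row.append(box)
--         else:
--             # Sort current row by x-coordinate
--             rows.append(sorted(current_row, key=lambda x: x[0][1]))
--             current_row = [box]
--
--     if current_row:
--         rows.append(sorted(current_row, key=lambda x: x[0][1]))
--
--     # Flatten the rows
--     return [box for row in rows for box in row]
-- ===== SOURCE B (Python) =====
-- def sort_boxes_by_position(boxes, y_threshold=50):
--     """Selection-by-rows: repeatedly extract the topmost row (the first topmost
--     box plus every remaining box within y_threshold of the top line) and emit it
--     sorted by (x1, y1).  No global y-sort: rows are peeled off by min-extraction."""
--     if not boxes:
--         return []
--     i, lead = min(enumerate(boxes), key=lambda t: t[1][0][0])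
--     top = lead[0][0]
--     row = [b for j, b in enumerate(boxes) if j == i or b[0][0] - top <= y_threshold]
--     rest = [b for j, b in enumerate(boxes) if j != i and b[0][0] - top > y_threshold]
--     return sorted(row, key=lambda b: (b[0][1], b[0][0])) + sort_boxes_by_position(rest, y_threshold)
-- ===== Notes on version B (the rewrite author's own statement) =====
-- stated objective: alternative
-- what changed: B never sorts the boxes by y at all: it recursively extracts the topmost row (the first box with minimal y1 plus every box within y_threshold of it, found by a min-scan over the unsorted list) and emits each row with a single sort by the compound key (x1, y1), instead of A's global y-sort followed by a linear grouping scan and a per-row x-sort.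
import Mathlib
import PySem

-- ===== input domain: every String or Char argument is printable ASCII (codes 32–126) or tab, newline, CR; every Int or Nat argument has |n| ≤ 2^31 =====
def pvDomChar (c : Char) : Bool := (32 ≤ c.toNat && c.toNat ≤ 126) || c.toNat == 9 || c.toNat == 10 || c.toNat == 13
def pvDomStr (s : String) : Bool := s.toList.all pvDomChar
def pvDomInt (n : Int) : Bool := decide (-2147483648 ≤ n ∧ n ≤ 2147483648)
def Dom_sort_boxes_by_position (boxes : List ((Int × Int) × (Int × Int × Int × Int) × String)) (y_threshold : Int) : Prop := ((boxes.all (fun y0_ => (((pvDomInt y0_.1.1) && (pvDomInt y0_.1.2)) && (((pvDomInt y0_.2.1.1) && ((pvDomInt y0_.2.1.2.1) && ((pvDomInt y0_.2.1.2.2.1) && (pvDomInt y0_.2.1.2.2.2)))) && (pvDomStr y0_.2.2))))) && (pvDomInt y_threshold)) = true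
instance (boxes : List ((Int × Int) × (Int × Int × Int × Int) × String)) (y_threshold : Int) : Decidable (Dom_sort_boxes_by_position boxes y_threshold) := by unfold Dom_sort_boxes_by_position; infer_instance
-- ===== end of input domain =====

-- B replaces A's global y-sort + linear grouping scan by recursive row extraction: repeatedly
-- find the first topmost box, peel off its whole row, sort that row once by (x1, y1), recurse
-- on the remainder; an alternative decomposition of the same task (no global sort at all).

abbrev PvB : Type := (Int × Int) × (Int × Int × Int × Int) × String

-- ===== PORT A =====
-- sorted(current_row, key=lambda x: x[0][1])
def pvSortX (row : List PvB) : List PvB := PySem.List.sorted row (fun x => x.1.2)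

-- one iteration of A's for-loop: state = (rows, current_row)
def pvStepA (thr : Int) (st : List (List PvB) × List PvB) (box : PvB) :
    List (List PvB) × List PvB :=
  match st.2 with
  | [] => (st.1, st.2 ++ [box])          -- 'not current_row' branch of the or
  | c :: _ =>
      if |box.1.1 - c.1.1| ≤ thr then (st.1, st.2 ++ [box])
      else (st.1 ++ [pvSortX st.2], [box])

def sort_boxes_by_position (boxes : List ((Int × Int) × (Int × Int × Int × Int) × String)) (y_threshold : Int) : List ((Int × Int) × (Int × Int × Int × Int) × String) :=
  let sorted_by_y := PySem.List.sorted boxes (fun x => x.1.1)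
  let st := sorted_by_y.foldl (pvStepA y_threshold) ([], [])
  let rows := if st.2 = [] then st.1 else st.1 ++ [pvSortX st.2]
  rows.flatten

-- ===== PORT B =====
-- termination helper for B: the 'rest' comprehension drops the lead's position
theorem pv_filterMap_length_lt {α β : Type} (f : α → Option β) (L : List α)
    (h : ∃ t ∈ L, f t = none) : (L.filterMap f).length < L.length := by
  induction L with
  | nil => simp at h
  | cons a L ih =>
      rcases h with ⟨t, ht, hf⟩
      rcases List.mem_cons.mp ht with rfl | ht
      · rw [List.filterMap_cons, hf]
        exact Nat.lt_succ_of_le (List.length_filterMap_le f L)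
      · have hih := ih ⟨t, ht, hf⟩
        rw [List.filterMap_cons]
        cases hfa : f a
        · simpa using Nat.lt_succ_of_lt hih
        · simpa using Nat.succ_lt_succ hih

def sort_boxes_by_position_alt (boxes : List ((Int × Int) × (Int × Int × Int × Int) × String)) (y_threshold : Int) : List ((Int × Int) × (Int × Int × Int × Int) × String) :=
  -- 'if not boxes: return []' — min? of the enumeration is none exactly on the empty list
  match hm : PySem.List.min? (PySem.List.enumerate boxes 0) (fun t => t.2.1.1) with
  | none => []
  | some il =>
      -- il = (i, lead) = min(enumerate(boxes), key=lambda t: t[1][0][0]); top = lead[0][0]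
      let top := il.2.1.1
      let row := (PySem.List.enumerate boxes 0).filterMap
        (fun t => if t.1 = il.1 ∨ t.2.1.1 - top ≤ y_threshold then some t.2 else none)
      let rest := (PySem.List.enumerate boxes 0).filterMap
        (fun t => if t.1 ≠ il.1 ∧ t.2.1.1 - top > y_threshold then some t.2 else none)
      PySem.List.sorted2 row (fun b => b.1.2) (fun b => b.1.1) ++
        sort_boxes_by_position_alt rest y_threshold
termination_by boxes.length
decreasing_by
  have hmem := PySem.List.min?_mem hm
  have hlt := pv_filterMap_length_lt
    (fun t : Int × PvB => if t.1 ≠ il.1 ∧ t.2.1.1 - il.2.1.1 > y_threshold then some t.2 else none)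
    (PySem.List.enumerate boxes 0) ⟨il, hmem, by simp⟩
  simpa [PySem.List.length_enumerate] using hlt

-- ===== PRECONDITION & SPEC =====
def Spec_sort_boxes_by_position (boxes : List ((Int × Int) × (Int × Int × Int × Int) × String)) (y_threshold : Int) (out : List ((Int × Int) × (Int × Int × Int × Int) × String)) : Prop := out = sort_boxes_by_position_alt boxes y_threshold
instance (boxes : List ((Int × Int) × (Int × Int × Int × Int) × String)) (y_threshold : Int) (out : List ((Int × Int) × (Int × Int × Int × Int) × String)) : Decidable (Spec_sort_boxes_by_position boxes y_threshold out) := by unfold Spec_sort_boxes_by_position; infer_instance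

-- ===== CLAIM (what is proved, stated in full; the proofs are below) =====
def Claim_equal_sort_boxes_by_position : Prop := ∀ (boxes : List ((Int × Int) × (Int × Int × Int × Int) × String)) (y_threshold : Int), Dom_sort_boxes_by_position boxes y_threshold → Spec_sort_boxes_by_position boxes y_threshold (sort_boxes_by_position boxes y_threshold)

-- ===== LEMMAS AND PROOFS =====

-- abbreviations for the three insertion orders
def pvBefY (a b : PvB) : Bool := decide (a.1.1 < b.1.1)
def pvBefX (a b : PvB) : Bool := decide (a.1.2 < b.1.2)
def pvBefL (a b : PvB) : Bool := decide (a.1.2 < b.1.2) || (!decide (b.1.2 < a.1.2) && decide (a.1.1 < b.1.1))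
def pvSortY (l : List PvB) : List PvB := PySem.List.sorted l (fun b => b.1.1)

theorem pv_sortY_eq (l : List PvB) :
    pvSortY l = l.foldl (fun acc x => PySem.List.insertBy pvBefY x acc) [] := rfl
theorem pv_sorted2_eq (l : List PvB) :
    PySem.List.sorted2 l (fun b => b.1.2) (fun b => b.1.1)
      = l.foldl (fun acc x => PySem.List.insertBy pvBefL x acc) [] := rfl

-- ---- generic facts about insertBy ----

theorem pv_insertBy_of_forall_before {bef : PvB → PvB → Bool} (x : PvB) (l : List PvB)
    (h : ∀ a ∈ l, bef x a = true) : PySem.List.insertBy bef x l = x :: l := by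
  cases l with
  | nil => rfl
  | cons a l => simp [PySem.List.insertBy, h a (by simp)]

-- C1: commuting an x-insert past a lex-insert of a strictly-later-row element
theorem pv_ins_cons (bef : PvB → PvB → Bool) (x a : PvB) (S : List PvB) :
    PySem.List.insertBy bef x (a :: S)
      = if bef x a = true then x :: a :: S else a :: PySem.List.insertBy bef x S := rfl

theorem pvBefX_iff (a b : PvB) : pvBefX a b = true ↔ a.1.2 < b.1.2 := by simp [pvBefX]
theorem pvBefY_iff (a b : PvB) : pvBefY a b = true ↔ a.1.1 < b.1.1 := by simp [pvBefY]
theorem pvBefL_iff (a b : PvB) :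
    pvBefL a b = true ↔ (a.1.2 < b.1.2 ∨ (¬ b.1.2 < a.1.2 ∧ a.1.1 < b.1.1)) := by
  simp [pvBefL]

theorem pv_commute (x z : PvB) (S : List PvB) (h : x.1.1 < z.1.1) :
    PySem.List.insertBy pvBefX z (PySem.List.insertBy pvBefL x S)
      = PySem.List.insertBy pvBefL x (PySem.List.insertBy pvBefX z S) := by
  have hLzXx : pvBefL x z = !pvBefX z x := by
    by_cases h1 : z.1.2 < x.1.2 <;> by_cases h2 : x.1.2 < z.1.2 <;>
      simp [pvBefL, pvBefX, h1, h2] <;> omega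
  induction S with
  | nil =>
      cases hXx : pvBefX z x with
      | false =>
          rw [hXx] at hLzXx; simp only [Bool.not_false] at hLzXx
          simp [PySem.List.insertBy, hXx, hLzXx]
      | true =>
          rw [hXx] at hLzXx; simp only [Bool.not_true] at hLzXx
          simp [PySem.List.insertBy, hXx, hLzXx]
  | cons a S ih =>
      cases hLa : pvBefL x a with
      | true =>
          cases hXa : pvBefX z a with
          | true =>
              cases hXx : pvBefX z x with
              | false =>
                  rw [hXx] at hLzXx; simp only [Bool.not_false] at hLzXx
                  simp [pv_ins_cons, hLa, hXa, hXx, hLzXx]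
              | true =>
                  rw [hXx] at hLzXx; simp only [Bool.not_true] at hLzXx
                  simp [pv_ins_cons, hLa, hXa, hXx, hLzXx]
          | false =>
              have hLa' := (pvBefL_iff x a).mp hLa
              have hXa' : ¬ z.1.2 < a.1.2 := fun hc => by
                exact absurd ((pvBefX_iff z a).mpr hc) (by simp [hXa])
              have hXx : pvBefX z x = false := by
                rw [← Bool.not_eq_true, pvBefX_iff]; omega
              rw [hXx] at hLzXx; simp only [Bool.not_false] at hLzXx
              simp [pv_ins_cons, hLa, hXa, hXx, hLzXx]
      | false =>
          cases hXa : pvBefX z a with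
          | true =>
              have hLa' : ¬ (x.1.2 < a.1.2 ∨ (¬ a.1.2 < x.1.2 ∧ x.1.1 < a.1.1)) := fun hc => by
                exact absurd ((pvBefL_iff x a).mpr hc) (by simp [hLa])
              have hXa' := (pvBefX_iff z a).mp hXa
              have hXx : pvBefX z x = true := (pvBefX_iff z x).mpr (by omega)
              rw [hXx] at hLzXx; simp only [Bool.not_true] at hLzXx
              simp [pv_ins_cons, hLa, hXa, hXx, hLzXx]
          | false =>
              simp [pv_ins_cons, hLa, hXa, ih]

-- C2: inserting by x alone = inserting lexicographically, over elements with y ≤ x's y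
theorem pv_insX_eq_insL (x : PvB) (S : List PvB) (h : ∀ a ∈ S, a.1.1 ≤ x.1.1) :
    PySem.List.insertBy pvBefX x S = PySem.List.insertBy pvBefL x S := by
  induction S with
  | nil => rfl
  | cons a S ih =>
      have ha : a.1.1 ≤ x.1.1 := h a List.mem_cons_self
      have hb : pvBefL x a = pvBefX x a := by
        simp only [pvBefL, pvBefX]
        have : decide (x.1.1 < a.1.1) = false := by simp; omega
        rw [this]
        simp
      simp only [PySem.List.insertBy, hb]
      by_cases hx : pvBefX x a = true
      · simp [hx]
      · simp only [hx, Bool.false_eq_true, if_false]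
        rw [ih (fun b hb' => h b (List.mem_cons_of_mem _ hb'))]

-- C3: an entire x-insertion pass commutes with one lex-insert of a strictly smaller-y element
theorem pv_foldl_commute (L : List PvB) (x : PvB) (S : List PvB)
    (h : ∀ z ∈ L, x.1.1 < z.1.1) :
    L.foldl (fun acc t => PySem.List.insertBy pvBefX t acc) (PySem.List.insertBy pvBefL x S)
      = PySem.List.insertBy pvBefL x (L.foldl (fun acc t => PySem.List.insertBy pvBefX t acc) S) := by
  induction L generalizing S with
  | nil => rfl
  | cons z L ih =>
      simp only [List.foldl_cons]
      rw [pv_commute x z S (h z List.mem_cons_self)]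
      exact ih _ (fun w hw => h w (List.mem_cons_of_mem _ hw))

-- C4: x-sorting a y-insert = lex-inserting into the x-sort
theorem pv_foldl_insX_insY (m : List PvB) (x : PvB) (S : List PvB)
    (hm : m.Pairwise (fun a b => a.1.1 ≤ b.1.1)) (hS : ∀ a ∈ S, a.1.1 ≤ x.1.1) :
    (PySem.List.insertBy pvBefY x m).foldl (fun acc t => PySem.List.insertBy pvBefX t acc) S
      = PySem.List.insertBy pvBefL x (m.foldl (fun acc t => PySem.List.insertBy pvBefX t acc) S) := by
  induction m generalizing S with
  | nil =>
      simp only [PySem.List.insertBy, List.foldl_cons, List.foldl_nil]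
      exact pv_insX_eq_insL x S hS
  | cons a m ih =>
      rcases List.pairwise_cons.mp hm with ⟨ham, hm'⟩
      simp only [PySem.List.insertBy]
      by_cases hY : pvBefY x a = true
      · have hxa : x.1.1 < a.1.1 := by simpa [pvBefY] using hY
        simp only [hY, if_true, List.foldl_cons]
        rw [pv_insX_eq_insL x S hS]
        exact pv_foldl_commute (a :: m) x S
          (by intro w hw
              rcases List.mem_cons.mp hw with rfl | hw
              · exact hxa
              · exact lt_of_lt_of_le hxa (ham w hw))
      · have hax : a.1.1 ≤ x.1.1 := by
          simp only [pvBefY, decide_eq_true_eq] at hY; omega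
        simp only [hY, Bool.false_eq_true, if_false, List.foldl_cons]
        rw [ih _ hm' (by
          intro b hb
          rcases (PySem.List.mem_insertBy _ _ _ _).mp hb with rfl | hb
          · exact hax
          · exact hS b hb)]

theorem pv_sortY_snoc (l : List PvB) (x : PvB) :
    pvSortY (l ++ [x]) = PySem.List.insertBy pvBefY x (pvSortY l) := by
  simp [pv_sortY_eq, List.foldl_append]

theorem pv_sorted2_snoc (l : List PvB) (x : PvB) :
    PySem.List.sorted2 (l ++ [x]) (fun b => b.1.2) (fun b => b.1.1)
      = PySem.List.insertBy pvBefL x (PySem.List.sorted2 l (fun b => b.1.2) (fun b => b.1.1)) := by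
  simp [pv_sorted2_eq, List.foldl_append]

theorem pv_sortY_pairwise (l : List PvB) :
    (pvSortY l).Pairwise (fun a b => a.1.1 ≤ b.1.1) :=
  PySem.List.sorted_pairwise l (fun b => b.1.1)

-- C5: the single (x1, y1) sort is the x-sort of the y-sort (stable-sort composition)
theorem pv_sorted2_eq_sortX_sortY (l : List PvB) :
    PySem.List.sorted2 l (fun b => b.1.2) (fun b => b.1.1) = pvSortX (pvSortY l) := by
  induction l using List.reverseRecOn with
  | nil => rfl
  | append_singleton l x ih =>
      rw [pv_sorted2_snoc, ih, pv_sortY_snoc]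
      rw [show pvSortX (PySem.List.insertBy pvBefY x (pvSortY l))
            = (PySem.List.insertBy pvBefY x (pvSortY l)).foldl
                (fun acc t => PySem.List.insertBy pvBefX t acc) [] from rfl]
      rw [pv_foldl_insX_insY (pvSortY l) x [] (pv_sortY_pairwise l) (by simp)]
      rw [show (pvSortY l).foldl (fun acc t => PySem.List.insertBy pvBefX t acc) []
            = pvSortX (pvSortY l) from rfl]

-- ---- filter commutes with the stable y-sort ----

theorem pv_filter_insY (p : PvB → Bool) (x : PvB) (m : List PvB)
    (hm : m.Pairwise (fun a b => a.1.1 ≤ b.1.1)) :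
    (PySem.List.insertBy pvBefY x m).filter p
      = if p x then PySem.List.insertBy pvBefY x (m.filter p) else m.filter p := by
  induction m with
  | nil =>
      cases hpx : p x <;> simp [PySem.List.insertBy, List.filter, hpx]
  | cons a m ih =>
      rcases List.pairwise_cons.mp hm with ⟨ham, hm'⟩
      rw [pv_ins_cons]
      by_cases hY : pvBefY x a = true
      · have hxa : x.1.1 < a.1.1 := (pvBefY_iff x a).mp hY
        rw [if_pos hY]
        cases hpx : p x with
        | true =>
            rw [List.filter_cons_of_pos hpx, if_pos rfl]
            refine Eq.symm (pv_insertBy_of_forall_before x _ ?_)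
            intro w hw
            have hw' : w ∈ a :: m := List.mem_of_mem_filter hw
            rcases List.mem_cons.mp hw' with rfl | hw''
            · exact (pvBefY_iff x w).mpr hxa
            · exact (pvBefY_iff x w).mpr (lt_of_lt_of_le hxa (ham w hw''))
        | false =>
            rw [List.filter_cons_of_neg (by simp [hpx])]
            simp [hpx]
      · rw [if_neg hY]
        cases hpa : p a with
        | true =>
            rw [List.filter_cons_of_pos hpa, List.filter_cons_of_pos hpa, ih hm']
            cases hpx : p x with
            | true => rw [if_pos rfl, if_pos rfl, pv_ins_cons, if_neg hY]
            | false => rw [if_neg (by simp), if_neg (by simp)]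
        | false =>
            rw [List.filter_cons_of_neg (by simp [hpa]), List.filter_cons_of_neg (by simp [hpa]),
              ih hm']

theorem pv_filter_sortY (p : PvB → Bool) (l : List PvB) :
    pvSortY (l.filter p) = (pvSortY l).filter p := by
  induction l using List.reverseRecOn with
  | nil => rfl
  | append_singleton l x ih =>
      rw [List.filter_append, pv_sortY_snoc,
        pv_filter_insY p x (pvSortY l) (pv_sortY_pairwise l)]
      cases hpx : p x with
      | true =>
          rw [if_pos rfl]
          rw [show List.filter p [x] = [x] from by simp [List.filter, hpx]]
          rw [pv_sortY_snoc, ih]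
      | false =>
          rw [show List.filter p [x] = [] from by simp [List.filter, hpx]]
          simp only [List.append_nil, Bool.false_eq_true, if_false]
          exact ih

-- ---- selection step: the stable y-sort starts with the first topmost element ----

theorem pv_foldl_insY_cons (bs T : List PvB) (x : PvB)
    (h : ∀ z ∈ bs, ¬ z.1.1 < x.1.1) :
    bs.foldl (fun acc t => PySem.List.insertBy pvBefY t acc) (x :: T)
      = x :: bs.foldl (fun acc t => PySem.List.insertBy pvBefY t acc) T := by
  induction bs generalizing T with
  | nil => rfl
  | cons z bs ih =>
      simp only [List.foldl_cons]
      rw [pv_ins_cons, if_neg (by rw [pvBefY_iff]; exact h z List.mem_cons_self)]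
      exact ih _ (fun w hw => h w (List.mem_cons_of_mem _ hw))

theorem pv_selection (bs : List PvB) (acc : List PvB) (n : Nat) (lead : PvB)
    (hget : bs[n]? = some lead)
    (hfirst : ∀ m b, m < n → bs[m]? = some b → lead.1.1 < b.1.1)
    (hmin : ∀ z ∈ bs, lead.1.1 ≤ z.1.1)
    (hacc : ∀ a ∈ acc, lead.1.1 < a.1.1) :
    bs.foldl (fun acc t => PySem.List.insertBy pvBefY t acc) acc
      = lead :: (bs.eraseIdx n).foldl (fun acc t => PySem.List.insertBy pvBefY t acc) acc := by
  induction bs generalizing acc n with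
  | nil => simp at hget
  | cons b bs ih =>
      cases n with
      | zero =>
          have hbl : b = lead := by simpa using hget
          subst hbl
          rw [List.eraseIdx_cons_zero, List.foldl_cons]
          rw [pv_insertBy_of_forall_before b acc
            (fun a ha => (pvBefY_iff b a).mpr (hacc a ha))]
          exact pv_foldl_insY_cons bs acc b
            (fun z hz => not_lt.mpr (hmin z (List.mem_cons_of_mem _ hz)))
      | succ m =>
          rw [List.getElem?_cons_succ] at hget
          rw [List.eraseIdx_cons_succ, List.foldl_cons, List.foldl_cons]
          have hb : lead.1.1 < b.1.1 := hfirst 0 b (Nat.succ_pos m) (by simp)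
          exact ih (PySem.List.insertBy pvBefY b acc) m hget
            (fun k c hk hc => hfirst (k + 1) c (by omega) (by rwa [List.getElem?_cons_succ]))
            (fun z hz => hmin z (List.mem_cons_of_mem _ hz))
            (fun a ha => by
              rcases (PySem.List.mem_insertBy _ _ _ _).mp ha with rfl | ha
              · exact hb
              · exact hacc a ha)

-- ---- characterisation of min? over an enumeration ----

def pvMinStep (acc : Option (Int × PvB)) (y : Int × PvB) : Option (Int × PvB) :=
  match acc with
  | none => some y
  | some m => if y.2.1.1 < m.2.1.1 then some y else some m

theorem pv_min?_eq (L : List (Int × PvB)) :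
    PySem.List.min? L (fun t : Int × PvB => t.2.1.1) = L.foldl pvMinStep none := by
  unfold PySem.List.min?
  congr 1
  funext acc y
  cases acc <;> rfl

theorem pv_min?_go (L : List (Int × PvB)) (a : Int × PvB) :
    L.foldl pvMinStep (some a)
    = some (match L.foldl pvMinStep none with
            | none => a
            | some m => if m.2.1.1 < a.2.1.1 then m else a) := by
  induction L generalizing a with
  | nil => rfl
  | cons x L ih =>
      rw [List.foldl_cons, List.foldl_cons,
        show pvMinStep none x = some x from rfl,
        show pvMinStep (some a) x
          = if x.2.1.1 < a.2.1.1 then some x else some a from rfl]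
      by_cases hxa : x.2.1.1 < a.2.1.1
      · rw [if_pos hxa, ih x]
        cases hmL : L.foldl pvMinStep none with
        | none => simp [hxa]
        | some m =>
            simp only
            by_cases hmx : m.2.1.1 < x.2.1.1
            · rw [if_pos hmx, if_pos (by omega)]
            · rw [if_neg hmx, if_pos hxa]
      · rw [if_neg hxa, ih a, ih x]
        cases hmL : L.foldl pvMinStep none with
        | none => simp [hxa]
        | some m =>
            simp only
            by_cases hmx : m.2.1.1 < x.2.1.1
            · by_cases hma : m.2.1.1 < a.2.1.1
              · rw [if_pos hma, if_pos hmx, if_pos hma]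
              · rw [if_neg hma, if_pos hmx, if_neg hma]
            · by_cases hma : m.2.1.1 < a.2.1.1
              · exact absurd hma (by omega)
              · rw [if_neg hma, if_neg hmx, if_neg (by omega)]

theorem pv_min?_cons (x : Int × PvB) (L : List (Int × PvB)) :
    PySem.List.min? (x :: L) (fun t : Int × PvB => t.2.1.1)
      = some (match PySem.List.min? L (fun t : Int × PvB => t.2.1.1) with
              | none => x
              | some m => if m.2.1.1 < x.2.1.1 then m else x) := by
  rw [pv_min?_eq, pv_min?_eq, List.foldl_cons, show pvMinStep none x = some x from rfl,
    pv_min?_go L x]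

theorem pv_minpos (boxes : List PvB) (s i : Int) (lead : PvB)
    (hm : PySem.List.min? (PySem.List.enumerate boxes s) (fun t => t.2.1.1) = some (i, lead)) :
    ∃ n : Nat, i = s + n ∧ boxes[n]? = some lead ∧
      (∀ m b, m < n → boxes[m]? = some b → lead.1.1 < b.1.1) := by
  induction boxes generalizing s i lead with
  | nil => simp [PySem.List.enumerate, PySem.List.min?] at hm
  | cons b boxes ih =>
      rw [PySem.List.enumerate_cons, pv_min?_cons] at hm
      cases hmL : PySem.List.min? (PySem.List.enumerate boxes (s + 1))
          (fun t : Int × PvB => t.2.1.1) with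
      | none =>
          rw [hmL] at hm
          simp only [Option.some.injEq] at hm
          rw [Prod.mk.injEq] at hm
          refine ⟨0, by simp [← hm.1], by simp [hm.2], by omega⟩
      | some m =>
          rw [hmL] at hm
          simp only [Option.some.injEq] at hm
          by_cases hk : m.2.1.1 < b.1.1
          · rw [if_pos (show m.2.1.1 < (s, b).2.1.1 from hk)] at hm
            subst hm
            rcases ih (s + 1) i lead hmL with ⟨n', hi, hget, hfirst⟩
            refine ⟨n' + 1, by push_cast; omega, by rwa [List.getElem?_cons_succ], ?_⟩
            intro k c hkn hc
            cases k with
            | zero =>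
                simp only [List.getElem?_cons_zero, Option.some.injEq] at hc
                subst hc
                exact hk
            | succ j =>
                rw [List.getElem?_cons_succ] at hc
                exact hfirst j c (by omega) hc
          · rw [if_neg (show ¬ m.2.1.1 < (s, b).2.1.1 from hk)] at hm
            rw [Prod.mk.injEq] at hm
            refine ⟨0, by simp [← hm.1], by simp [hm.2], by omega⟩

-- ---- the two comprehensions of B, rewritten ----

theorem pv_row_filter (boxes : List PvB) (s i top thr : Int)
    (h : ∀ t ∈ PySem.List.enumerate boxes s, t.1 = i → t.2.1.1 - top ≤ thr) :
    (PySem.List.enumerate boxes s).filterMap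
        (fun t => if t.1 = i ∨ t.2.1.1 - top ≤ thr then some t.2 else none)
      = boxes.filter (fun b => decide (b.1.1 - top ≤ thr)) := by
  induction boxes generalizing s with
  | nil => rfl
  | cons b boxes ih =>
      rw [PySem.List.enumerate_cons, List.filterMap_cons, List.filter_cons]
      by_cases hq : b.1.1 - top ≤ thr
      · rw [if_pos (Or.inr hq)]
        simp only [hq, decide_true, if_true]
        rw [ih (s + 1) (fun t ht hti => h t (by rw [PySem.List.enumerate_cons]; exact List.mem_cons_of_mem _ ht) hti)]
      · have hsi : ¬ s = i := fun hsi => hq (h (s, b) (by rw [PySem.List.enumerate_cons]; exact List.mem_cons_self) hsi)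
        rw [if_neg (by simpa [hsi] using hq)]
        simp only [hq, decide_false, if_false]
        exact ih (s + 1) (fun t ht hti => h t (by rw [PySem.List.enumerate_cons]; exact List.mem_cons_of_mem _ ht) hti)

theorem pv_rest_filter (boxes : List PvB) (s i top thr : Int)
    (h : ∀ t ∈ PySem.List.enumerate boxes s, t.1 = i → t.2.1.1 - top ≤ thr) :
    (PySem.List.enumerate boxes s).filterMap
        (fun t => if t.1 ≠ i ∧ t.2.1.1 - top > thr then some t.2 else none)
      = boxes.filter (fun b => !decide (b.1.1 - top ≤ thr)) := by
  induction boxes generalizing s with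
  | nil => rfl
  | cons b boxes ih =>
      rw [PySem.List.enumerate_cons, List.filterMap_cons, List.filter_cons]
      have ihs := ih (s + 1) (fun t ht hti => h t (by rw [PySem.List.enumerate_cons]; exact List.mem_cons_of_mem _ ht) hti)
      by_cases hq : b.1.1 - top ≤ thr
      · rw [if_neg (fun hc => absurd hc.2 (show ¬ thr < b.1.1 - top by omega))]
        simp only [hq, decide_true, Bool.not_true, if_false]
        exact ihs
      · have hsi : ¬ s = i := fun hsi => hq (h (s, b) (by rw [PySem.List.enumerate_cons]; exact List.mem_cons_self) hsi)
        rw [if_pos ⟨hsi, show thr < b.1.1 - top by omega⟩]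
        simp only [hq, decide_false, Bool.not_false, if_true]
        rw [ihs]

theorem pv_row_single (boxes : List PvB) (s i top thr : Int) (n : Nat) (lead : PvB)
    (hget : boxes[n]? = some lead) (hi : i = s + n)
    (h : ∀ t ∈ PySem.List.enumerate boxes s, ¬ (t.2.1.1 - top ≤ thr)) :
    (PySem.List.enumerate boxes s).filterMap
        (fun t => if t.1 = i ∨ t.2.1.1 - top ≤ thr then some t.2 else none)
      = [lead] := by
  induction boxes generalizing s n with
  | nil => simp at hget
  | cons b boxes ih =>
      rw [PySem.List.enumerate_cons, List.filterMap_cons]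
      have hhd := h (s, b) (by rw [PySem.List.enumerate_cons]; exact List.mem_cons_self)
      have htl : ∀ t ∈ PySem.List.enumerate boxes (s + 1), ¬ (t.2.1.1 - top ≤ thr) :=
        fun t ht => h t (by rw [PySem.List.enumerate_cons]; exact List.mem_cons_of_mem _ ht)
      cases n with
      | zero =>
          simp only [List.getElem?_cons_zero, Option.some.injEq] at hget
          subst hget
          rw [if_pos (Or.inl (by omega))]
          have : ∀ t ∈ PySem.List.enumerate boxes (s + 1),
              (if t.1 = i ∨ t.2.1.1 - top ≤ thr then some t.2 else (none : Option PvB)) = none := by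
            intro t ht
            rcases (PySem.List.mem_enumerate_iff _ _ _).mp ht with ⟨k, hk, rfl⟩
            refine if_neg ?_
            push_neg
            exact ⟨by omega, by have h2 := htl _ ht; omega⟩
          rw [List.filterMap_eq_nil_iff.mpr this]
      | succ m =>
          rw [List.getElem?_cons_succ] at hget
          rw [if_neg (by push_neg; exact ⟨by omega, by have h2 := hhd; omega⟩)]
          exact ih (s + 1) m hget (by omega) htl

theorem pv_rest_erase (boxes : List PvB) (s i top thr : Int) (n : Nat)
    (hi : i = s + n)
    (h : ∀ t ∈ PySem.List.enumerate boxes s, t.2.1.1 - top > thr) :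
    (PySem.List.enumerate boxes s).filterMap
        (fun t => if t.1 ≠ i ∧ t.2.1.1 - top > thr then some t.2 else none)
      = boxes.eraseIdx n := by
  induction boxes generalizing s n with
  | nil => rfl
  | cons b boxes ih =>
      rw [PySem.List.enumerate_cons, List.filterMap_cons]
      have hhd := h (s, b) (by rw [PySem.List.enumerate_cons]; exact List.mem_cons_self)
      have htl : ∀ t ∈ PySem.List.enumerate boxes (s + 1), t.2.1.1 - top > thr :=
        fun t ht => h t (by rw [PySem.List.enumerate_cons]; exact List.mem_cons_of_mem _ ht)
      cases n with
      | zero =>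
          rw [if_neg (by push_neg; intro hne; omega)]
          rw [List.eraseIdx_cons_zero]
          have : ∀ t ∈ PySem.List.enumerate boxes (s + 1),
              (if t.1 ≠ i ∧ t.2.1.1 - top > thr then some t.2 else (none : Option PvB)) = some t.2 := by
            intro t ht
            rcases (PySem.List.mem_enumerate_iff _ _ _).mp ht with ⟨k, hk, rfl⟩
            exact if_pos ⟨by omega, htl _ ht⟩
          calc (PySem.List.enumerate boxes (s+1)).filterMap
                (fun t => if t.1 ≠ i ∧ t.2.1.1 - top > thr then some t.2 else none)
              = (PySem.List.enumerate boxes (s+1)).filterMap (fun t => some t.2) :=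
                List.filterMap_congr this
            _ = (PySem.List.enumerate boxes (s+1)).map (fun t => t.2) :=
                List.filterMap_eq_map_iff_forall_eq_some.mpr (fun t _ => rfl)
            _ = boxes := PySem.List.map_snd_enumerate boxes (s+1)
      | succ m =>
          rw [if_pos ⟨by omega, hhd⟩, List.eraseIdx_cons_succ]
          rw [ih (s + 1) m (by omega) htl]

-- ---- A's grouping, via takeWhile/dropWhile ----

def pvGroupsAux (thr : Int) (c : PvB) (t : List PvB) : List PvB → List (List PvB)
  | [] => [c :: t]
  | b :: rest =>
      if |b.1.1 - c.1.1| ≤ thr then pvGroupsAux thr c (t ++ [b]) rest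
      else (c :: t) :: pvGroupsAux thr b [] rest

def pvGroups (thr : Int) : List PvB → List (List PvB)
  | [] => []
  | b :: rest => pvGroupsAux thr b [] rest

def pvAfl (thr : Int) (l : List PvB) : List PvB := ((pvGroups thr l).map pvSortX).flatten

theorem pv_A_loop (thr : Int) (rest : List PvB) (c : PvB) (t : List PvB)
    (rows : List (List PvB)) :
    (let st := rest.foldl (pvStepA thr) (rows, c :: t)
     if st.2 = [] then st.1 else st.1 ++ [pvSortX st.2])
      = rows ++ (pvGroupsAux thr c t rest).map pvSortX := by
  induction rest generalizing c t rows with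
  | nil => simp [pvGroupsAux]
  | cons b rest ih =>
      simp only [List.foldl_cons, pvStepA, pvGroupsAux]
      by_cases hb : |b.1.1 - c.1.1| ≤ thr
      · simp only [hb, if_true]
        have : (c :: t) ++ [b] = c :: (t ++ [b]) := by simp
        rw [this]
        exact ih c (t ++ [b]) rows
      · simp only [hb, if_false]
        rw [ih b [] (rows ++ [pvSortX (c :: t)])]
        simp [pvSortX]

theorem pv_A_eq_Afl (boxes : List PvB) (thr : Int) :
    sort_boxes_by_position boxes thr = pvAfl thr (pvSortY boxes) := by
  unfold sort_boxes_by_position pvAfl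
  cases hys : PySem.List.sorted boxes (fun x => x.1.1) with
  | nil => simp [pvSortY, hys, pvGroups]
  | cons b rest =>
      have hys' : pvSortY boxes = b :: rest := hys
      simp only [hys, List.foldl_cons, hys']
      have hA : pvStepA thr ([], []) b = ([], [b]) := rfl
      rw [hA]
      have hAl := pv_A_loop thr rest b [] []
      simp only at hAl
      rw [hAl]
      simp [pvGroups]

-- groupsAux in closed form
theorem pv_groupsAux_eq (thr : Int) (rest : List PvB) (c : PvB) (t : List PvB) :
    pvGroupsAux thr c t rest
      = (c :: (t ++ rest.takeWhile (fun b => decide (|b.1.1 - c.1.1| ≤ thr))))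
          :: pvGroups thr (rest.dropWhile (fun b => decide (|b.1.1 - c.1.1| ≤ thr))) := by
  induction rest generalizing t with
  | nil => simp [pvGroupsAux, pvGroups]
  | cons b rest ih =>
      by_cases hb : |b.1.1 - c.1.1| ≤ thr
      · rw [show pvGroupsAux thr c t (b :: rest) = pvGroupsAux thr c (t ++ [b]) rest from by
            simp [pvGroupsAux, hb]]
        rw [ih (t ++ [b]), List.takeWhile_cons, List.dropWhile_cons]
        simp [hb]
      · rw [show pvGroupsAux thr c t (b :: rest) = (c :: t) :: pvGroupsAux thr b [] rest from by
            simp [pvGroupsAux, hb]]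
        rw [List.takeWhile_cons, List.dropWhile_cons]
        simp only [hb, decide_false, Bool.false_eq_true, if_false]
        rw [show pvGroups thr (b :: rest) = pvGroupsAux thr b [] rest from rfl]
        simp

-- takeWhile = filter on a list where the predicate is downward closed along the order
theorem pv_takeWhile_eq_filter (p : PvB → Bool) (l : List PvB)
    (h : l.Pairwise (fun a b => p b = true → p a = true)) :
    l.takeWhile p = l.filter p ∧ l.dropWhile p = l.filter (fun b => !p b) := by
  induction l with
  | nil => simp
  | cons a l ih =>
      rcases List.pairwise_cons.mp h with ⟨ha, h'⟩
      rcases ih h' with ⟨iht, ihd⟩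
      cases hpa : p a with
      | true =>
          constructor
          · rw [List.takeWhile_cons, hpa, if_pos rfl, List.filter_cons_of_pos hpa, iht]
          · rw [List.dropWhile_cons, hpa, if_pos rfl, List.filter_cons_of_neg (by simp [hpa]),
              ihd]
      | false =>
          have hall : ∀ b ∈ l, p b = false := by
            intro b hb
            cases hpb : p b with
            | false => rfl
            | true => exact absurd (ha b hb hpb) (by simp [hpa])
          constructor
          · rw [List.takeWhile_cons, hpa, if_neg (by simp), List.filter_cons_of_neg (by simp [hpa])]
            exact (List.filter_eq_nil_iff.mpr (fun b hb => by simp [hall b hb])).symm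
          · rw [List.dropWhile_cons, hpa, if_neg (by simp), List.filter_cons_of_pos (by simp [hpa])]
            exact (congrArg (a :: ·)
              (List.filter_eq_self.mpr (fun b hb => by simp [hall b hb]))).symm

-- one decomposition step of A's grouped-and-flattened output, on a y-sorted list
theorem pv_Afl_step (thr : Int) (lead : PvB) (tail : List PvB)
    (hpw : (lead :: tail).Pairwise (fun a b : PvB => a.1.1 ≤ b.1.1)) :
    pvAfl thr (lead :: tail)
      = pvSortX (lead :: tail.filter (fun b => decide (b.1.1 - lead.1.1 ≤ thr)))
        ++ pvAfl thr (tail.filter (fun b => !decide (b.1.1 - lead.1.1 ≤ thr))) := by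
  rcases List.pairwise_cons.mp hpw with ⟨hlead, htail⟩
  have himp : tail.Pairwise (fun a b =>
      (fun x : PvB => decide (|x.1.1 - lead.1.1| ≤ thr)) b = true →
      (fun x : PvB => decide (|x.1.1 - lead.1.1| ≤ thr)) a = true) := by
    refine htail.imp_of_mem ?_
    intro a b ha hb hab hqb
    have h1 := hlead a ha
    have h2 := hlead b hb
    simp only [decide_eq_true_eq] at hqb ⊢
    rw [abs_of_nonneg (show (0:Int) ≤ b.1.1 - lead.1.1 by omega)] at hqb
    rw [abs_of_nonneg (show (0:Int) ≤ a.1.1 - lead.1.1 by omega)]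
    omega
  obtain ⟨htake, hdrop⟩ :=
    pv_takeWhile_eq_filter (fun x : PvB => decide (|x.1.1 - lead.1.1| ≤ thr)) tail himp
  have habs : ∀ b ∈ tail,
      (decide (|b.1.1 - lead.1.1| ≤ thr)) = (decide (b.1.1 - lead.1.1 ≤ thr)) := by
    intro b hb
    rw [abs_of_nonneg (show (0:Int) ≤ b.1.1 - lead.1.1 by have := hlead b hb; omega)]
  have habs' : ∀ b ∈ tail,
      (!decide (|b.1.1 - lead.1.1| ≤ thr)) = (!decide (b.1.1 - lead.1.1 ≤ thr)) :=
    fun b hb => by rw [habs b hb]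
  show ((pvGroups thr (lead :: tail)).map pvSortX).flatten = _
  rw [show pvGroups thr (lead :: tail) = pvGroupsAux thr lead [] tail from rfl,
    pv_groupsAux_eq, htake, hdrop, List.filter_congr habs, List.filter_congr habs']
  simp [pvAfl]

-- ---- main induction ----

-- unfolding lemmas for B's recursion
theorem pv_B_none (boxes : List PvB) (thr : Int)
    (h : PySem.List.min? (PySem.List.enumerate boxes 0) (fun t => t.2.1.1) = none) :
    sort_boxes_by_position_alt boxes thr = [] := by
  rw [sort_boxes_by_position_alt]
  split
  · rfl
  · rename_i il hm
    rw [h] at hm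
    cases hm

theorem pv_B_some (boxes : List PvB) (thr i : Int) (lead : PvB)
    (h : PySem.List.min? (PySem.List.enumerate boxes 0) (fun t => t.2.1.1) = some (i, lead)) :
    sort_boxes_by_position_alt boxes thr
      = PySem.List.sorted2
          ((PySem.List.enumerate boxes 0).filterMap
            (fun t => if t.1 = i ∨ t.2.1.1 - lead.1.1 ≤ thr then some t.2 else none))
          (fun b => b.1.2) (fun b => b.1.1)
        ++ sort_boxes_by_position_alt
            ((PySem.List.enumerate boxes 0).filterMap
              (fun t => if t.1 ≠ i ∧ t.2.1.1 - lead.1.1 > thr then some t.2 else none)) thr := by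
  conv_lhs => rw [sort_boxes_by_position_alt]
  split
  · rename_i hm
    rw [h] at hm
    cases hm
  · rename_i il hm
    rw [h] at hm
    obtain rfl : il = (i, lead) := by
      injection hm with hv
      exact hv.symm
    rfl

theorem pv_main (N : Nat) : ∀ (boxes : List PvB) (thr : Int), boxes.length ≤ N →
    sort_boxes_by_position_alt boxes thr = pvAfl thr (pvSortY boxes) := by
  induction N with
  | zero =>
      intro boxes thr hlen
      have hnil : boxes = [] := List.length_eq_zero_iff.mp (Nat.le_zero.mp hlen)
      subst hnil
      rw [pv_B_none [] thr rfl]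
      rfl
  | succ N ihN =>
      intro boxes thr hlen
      cases hm : PySem.List.min? (PySem.List.enumerate boxes 0)
          (fun t : Int × PvB => t.2.1.1) with
      | none =>
          have hnil : boxes = [] := by
            cases boxes with
            | nil => rfl
            | cons b bs =>
                rw [PySem.List.enumerate_cons, pv_min?_cons] at hm
                cases hm
          subst hnil
          rw [pv_B_none [] thr rfl]
          rfl
      | some il =>
          obtain ⟨i, lead⟩ := il
          rw [pv_B_some boxes thr i lead hm]
          obtain ⟨n, hi, hget, hfirst⟩ := pv_minpos boxes 0 i lead hm
          have hminv : ∀ z ∈ boxes, lead.1.1 ≤ z.1.1 := by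
            intro z hz
            rcases List.mem_iff_getElem.mp hz with ⟨k, hk, rfl⟩
            have hmem : ((0:Int) + k, boxes[k]) ∈ PySem.List.enumerate boxes 0 :=
              (PySem.List.mem_enumerate_iff _ _ _).mpr ⟨k, hk, rfl⟩
            simpa using PySem.List.min?_isMin hm _ hmem
          have hnlt : n < boxes.length := (List.getElem?_eq_some_iff.mp hget).1
          have hmemlead : lead ∈ boxes := by
            obtain ⟨hlt, hv⟩ := List.getElem?_eq_some_iff.mp hget
            exact hv ▸ List.getElem_mem hlt
          have hsel : pvSortY boxes = lead :: pvSortY (boxes.eraseIdx n) := by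
            rw [pv_sortY_eq, pv_sortY_eq]
            exact pv_selection boxes [] n lead hget hfirst hminv (by simp)
          have hpw : (lead :: pvSortY (boxes.eraseIdx n)).Pairwise
              (fun a b : PvB => a.1.1 ≤ b.1.1) := by
            rw [← hsel]; exact pv_sortY_pairwise boxes
          have hleadtail : ∀ b ∈ pvSortY (boxes.eraseIdx n), lead.1.1 ≤ b.1.1 :=
            (List.pairwise_cons.mp hpw).1
          have hmemE : ∀ t ∈ PySem.List.enumerate boxes 0, t.2 ∈ boxes := by
            intro t ht
            rcases (PySem.List.mem_enumerate_iff _ _ _).mp ht with ⟨k, hk, rfl⟩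
            exact List.getElem_mem hk
          have hidx : ∀ t ∈ PySem.List.enumerate boxes 0, t.1 = i → t.2 = lead := by
            intro t ht hti
            rcases (PySem.List.mem_enumerate_iff _ _ _).mp ht with ⟨k, hk, rfl⟩
            have hkn : k = n := by
              have : (0:Int) + k = 0 + n := by rw [← hi]; exact hti
              omega
            subst hkn
            have hv := (List.getElem?_eq_some_iff.mp hget).2
            simpa using hv
          by_cases hthr : 0 ≤ thr
          · rw [pv_row_filter boxes 0 i lead.1.1 thr
                (fun t ht hti => by rw [hidx t ht hti]; omega)]
            rw [pv_rest_filter boxes 0 i lead.1.1 thr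
                (fun t ht hti => by rw [hidx t ht hti]; omega)]
            rw [pv_sorted2_eq_sortX_sortY, pv_filter_sortY, hsel]
            have hflt : ((boxes.filter (fun b => !decide (b.1.1 - lead.1.1 ≤ thr))).length)
                < boxes.length :=
              List.length_filter_lt_length_iff_exists.mpr
                ⟨lead, hmemlead, by simp; omega⟩
            rw [ihN _ thr (by omega)]
            rw [pv_filter_sortY, hsel]
            rw [List.filter_cons_of_pos (by simp; omega),
              List.filter_cons_of_neg (by simp; omega)]
            rw [pv_Afl_step thr lead (pvSortY (boxes.eraseIdx n)) hpw]
          · rw [pv_row_single boxes 0 i lead.1.1 thr n lead hget hi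
                (fun t ht => by have := hminv t.2 (hmemE t ht); omega)]
            rw [pv_rest_erase boxes 0 i lead.1.1 thr n hi
                (fun t ht => by have := hminv t.2 (hmemE t ht); omega)]
            have hel : (boxes.eraseIdx n).length < boxes.length := by
              rw [List.length_eraseIdx]
              simp [hnlt]
              omega
            rw [ihN _ thr (by omega)]
            rw [hsel, pv_Afl_step thr lead (pvSortY (boxes.eraseIdx n)) hpw]
            rw [List.filter_eq_nil_iff.mpr
                (fun b hb => by simp; have := hleadtail b hb; omega)]
            rw [List.filter_eq_self.mpr
                (fun b hb => by simp; have := hleadtail b hb; omega)]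
            rfl

-- ===== VERDICT (by name: the statement is the Claim_ definition above) =====
theorem sort_boxes_by_position_spec : Claim_equal_sort_boxes_by_position := by
  intro boxes thr _
  show sort_boxes_by_position boxes thr = sort_boxes_by_position_alt boxes thr
  rw [pv_A_eq_Afl, pv_main boxes.length boxes thr (le_refl _)]
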